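-- pv_equiv track=rewrite | github.com/abdogr44/content-plan-agency | hashtag_researcher/tools/HashtagResearchEngine.py | _rank_hashtags_by_relevance
-- ===== SOURCE A (Python) =====
-- from typing import Dict, Any, List
--
-- def _rank_hashtags_by_relevance(hashtags: List[str], content_analysis: Dict) -> List[str]:
--     """Ranks hashtags by relevance to content"""
--
--     # Simple ranking based on content keywords
--     content_keywords = content_analysis["content_keywords"]
--
--     ranked_hashtags = []
--     for hashtag in hashtags:
--         # Clean hashtag (remove #)
--         clean_hashtag = hashtag.replace("#", "").lower()
--
--         # Calculate relevance score
--         relevance_score = 0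
--         for keyword in content_keywords:
--             if keyword in clean_hashtag or clean_hashtag in keyword:
--                 relevance_score += 1
--
--         ranked_hashtags.append((hashtag, relevance_score))
--
--     # Sort by relevance score (descending)
--     ranked_hashtags.sort(key=lambda x: x[1], reverse=True)
--
--     return [hashtag for hashtag, score in ranked_hashtags]
-- ===== SOURCE B (Python) =====
-- def _rank_hashtags_by_relevance(hashtags, content_analysis):
--     """Ranks hashtags by relevance to content (bucket emission instead of sort)"""
--     content_keywords = content_analysis["content_keywords"]
--
--     # Score each hashtag once (count of bidirectional substring matches)
--     scored = []
--     for h in hashtags: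
--         ch = h.replace("#", "").lower()
--         score = sum(1 for kw in content_keywords if kw in ch or ch in kw)
--         scored.append((score, h))
--
--     # Bucket by score, keeping original order inside each bucket
--     buckets = {}
--     for score, h in scored:
--         buckets[score] = buckets.get(score, []) + [h]
--
--     # Emit buckets from the highest possible score down to 0
--     out = []
--     for s in range(len(content_keywords), -1, -1):
--         out.extend(buckets.get(s, []))
--     return out
-- ===== Notes on version B (the rewrite author's own statement) =====
-- stated objective: alternative
-- what changed: Replaces the stable reverse comparison sort of (hashtag, score) pairs by a counting/bucket scheme: hashtags are grouped into a dict score -> bucket and the result is emitted by scanning the scores from len(content_keywords) down to 0.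
import Mathlib
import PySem

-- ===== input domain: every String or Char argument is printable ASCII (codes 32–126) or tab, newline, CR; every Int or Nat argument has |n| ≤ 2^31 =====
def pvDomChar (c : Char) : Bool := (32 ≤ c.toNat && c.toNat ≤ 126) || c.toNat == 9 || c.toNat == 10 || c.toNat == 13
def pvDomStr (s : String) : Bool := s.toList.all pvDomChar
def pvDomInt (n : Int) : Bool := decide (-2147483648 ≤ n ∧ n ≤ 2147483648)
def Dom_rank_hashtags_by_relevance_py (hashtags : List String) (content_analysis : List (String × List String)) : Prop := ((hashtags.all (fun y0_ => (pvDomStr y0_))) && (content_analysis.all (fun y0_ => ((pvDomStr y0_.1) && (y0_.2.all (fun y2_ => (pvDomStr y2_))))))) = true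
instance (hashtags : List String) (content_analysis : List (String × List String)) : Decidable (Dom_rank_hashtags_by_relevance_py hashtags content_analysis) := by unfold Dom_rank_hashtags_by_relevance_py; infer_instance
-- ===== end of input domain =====

-- B replaces A's stable reverse sort by score buckets emitted from the top score down (alternative algorithm, same results).

-- ===== PORT A =====
def rank_hashtags_by_relevance_py (hashtags : List String) (content_analysis : List (String × List String)) : List String :=
  match content_analysis.lookup "content_keywords" with
  | none => []  -- KeyError in Python; excluded by Pre_
  | some content_keywords =>
    let ranked_hashtags := hashtags.foldl (fun acc hashtag =>
      let clean_hashtag := PySem.Str.lower (PySem.Str.replace hashtag "#" "")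
      let relevance_score := content_keywords.foldl (fun r keyword =>
        if PySem.Str.isIn keyword clean_hashtag || PySem.Str.isIn clean_hashtag keyword then r + 1 else r) (0 : Int)
      acc ++ [(hashtag, relevance_score)]) ([] : List (String × Int))
    (PySem.List.sorted ranked_hashtags (fun x => x.2) true).map (fun x => x.1)

-- ===== PORT B =====
def rank_hashtags_by_relevance_py_alt (hashtags : List String) (content_analysis : List (String × List String)) : List String :=
  match content_analysis.lookup "content_keywords" with
  | none => []  -- KeyError in Python; excluded by Pre_
  | some content_keywords =>
    let scored := hashtags.map (fun h =>
      let ch := PySem.Str.lower (PySem.Str.replace h "#" "")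
      (((content_keywords.countP (fun kw => PySem.Str.isIn kw ch || PySem.Str.isIn ch kw)) : Int), h))
    let buckets := scored.foldl (fun d p => d.modify p.1 [] (fun l => l ++ [p.2])) (PySem.Dict.empty : PySem.Dict Int (List String))
    (PySem.List.pyRange (content_keywords.length : Int) (-1) (-1)).foldl (fun acc s => acc ++ buckets.getD s []) []

-- ===== PRECONDITION & SPEC =====
-- Pre_ excludes exactly the dicts without a "content_keywords" key, on which A raises KeyError.
def Pre_rank_hashtags_by_relevance_py (hashtags : List String) (content_analysis : List (String × List String)) : Prop :=
  (content_analysis.lookup "content_keywords").isSome = true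
instance (hashtags : List String) (content_analysis : List (String × List String)) : Decidable (Pre_rank_hashtags_by_relevance_py hashtags content_analysis) := by unfold Pre_rank_hashtags_by_relevance_py; infer_instance

def pvWitness_rank_hashtags_by_relevance_py : List String × (List (String × List String)) :=
  (["#AI", "#ml", "#Data"], [("content_keywords", ["ai", "data"])])

def Spec_rank_hashtags_by_relevance_py (hashtags : List String) (content_analysis : List (String × List String)) (out : List String) : Prop := out = rank_hashtags_by_relevance_py_alt hashtags content_analysis
instance (hashtags : List String) (content_analysis : List (String × List String)) (out : List String) : Decidable (Spec_rank_hashtags_by_relevance_py hashtags content_analysis out) := by unfold Spec_rank_hashtags_by_relevance_py; infer_instance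

-- ===== CLAIM (what is proved, stated in full; the proofs are below) =====
def Claim_equal_rank_hashtags_by_relevance_py : Prop := ∀ (hashtags : List String) (content_analysis : List (String × List String)), Dom_rank_hashtags_by_relevance_py hashtags content_analysis → Pre_rank_hashtags_by_relevance_py hashtags content_analysis → Spec_rank_hashtags_by_relevance_py hashtags content_analysis (rank_hashtags_by_relevance_py hashtags content_analysis)

-- ===== LEMMAS AND PROOFS =====

-- concatenation of the buckets F n, F (n-1), …, F 0
def concatD {α : Type} (F : Int → List α) : Nat → List α
  | 0 => F 0
  | n + 1 => F ((n : Int) + 1) ++ concatD F n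

theorem concatD_nil {α : Type} (n : Nat) : concatD (fun _ => ([] : List α)) n = [] := by
  induction n with
  | zero => rfl
  | succ n ih => simp [concatD, ih]

theorem concatD_congr {α : Type} {F G : Int → List α} (n : Nat)
    (h : ∀ s : Int, 0 ≤ s → s ≤ (n : Int) → F s = G s) : concatD F n = concatD G n := by
  induction n with
  | zero => exact h 0 le_rfl le_rfl
  | succ n ih =>
    simp only [concatD]
    rw [h ((n : Int) + 1) (by omega) (by push_cast; omega),
      ih (fun s h1 h2 => h s h1 (by omega))]

theorem map_concatD {α β : Type} (g : α → β) (F : Int → List α) (n : Nat) :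
    (concatD F n).map g = concatD (fun s => (F s).map g) n := by
  induction n with
  | zero => rfl
  | succ n ih => simp [concatD, ih]

-- the descending-range emission loop is concatD
theorem foldl_pyRange_desc {α : Type} (G : Int → List α) (n : Nat) (init : List α) :
    (PySem.List.pyRange (n : Int) (-1) (-1)).foldl (fun acc s => acc ++ G s) init
      = init ++ concatD G n := by
  induction n generalizing init with
  | zero =>
    rw [PySem.List.pyRange_neg_one_cons (by norm_num),
      PySem.List.pyRange_neg_one_eq_nil (by norm_num)]
    rfl
  | succ n ih =>
    rw [PySem.List.pyRange_neg_one_cons (by push_cast; omega)]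
    have h1 : ((n : Int) + 1) - 1 = (n : Int) := by omega
    simp only [List.foldl_cons, Nat.cast_succ, h1, ih]
    simp [concatD, List.append_assoc]

theorem insertBy_cons_of_not_before {α : Type} (before : α → α → Bool) (x y : α) (ys : List α)
    (h : before x y = false) :
    PySem.List.insertBy before x (y :: ys) = y :: PySem.List.insertBy before x ys := by
  simp [PySem.List.insertBy, h]

theorem insertBy_append_left {α : Type} (before : α → α → Bool) (x : α) (A B : List α)
    (hA : ∀ a ∈ A, before x a = false) :
    PySem.List.insertBy before x (A ++ B) = A ++ PySem.List.insertBy before x B := by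
  induction A with
  | nil => rfl
  | cons a A ih =>
    rw [List.cons_append, insertBy_cons_of_not_before _ _ _ _ (hA a List.mem_cons_self),
      ih (fun a ha => hA a (List.mem_cons_of_mem _ ha)), List.cons_append]

theorem insertBy_cons_of_before {α : Type} (before : α → α → Bool) (x y : α) (ys : List α)
    (h : before x y = true) :
    PySem.List.insertBy before x (y :: ys) = x :: y :: ys := by
  simp [PySem.List.insertBy, h]

theorem mem_concatD_key_le (F : Int → List (String × Int))
    (hF : ∀ s : Int, ∀ a ∈ F s, a.2 = s) (n : Nat) (b : String × Int)
    (hb : b ∈ concatD F n) : b.2 ≤ (n : Int) := by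
  induction n with
  | zero => exact le_of_eq (hF 0 b hb)
  | succ n ih =>
    simp only [concatD, List.mem_append] at hb
    rcases hb with hb | hb
    · rw [hF _ b hb]; push_cast; omega
    · have := ih hb; push_cast at this ⊢; omega

-- inserting an element with key in [0, n] into a descending bucket concatenation
-- appends it at the end of its own bucket
theorem insertBy_concatD (F : Int → List (String × Int)) (x : String × Int) (n : Nat)
    (hx0 : 0 ≤ x.2) (hxn : x.2 ≤ (n : Int))
    (hF : ∀ s : Int, ∀ a ∈ F s, a.2 = s) :
    PySem.List.insertBy (fun a b => decide (b.2 < a.2)) x (concatD F n)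
      = concatD (fun s => F s ++ if x.2 = s then [x] else []) n := by
  induction n with
  | zero =>
    have hx : x.2 = 0 := le_antisymm hxn hx0
    simp only [concatD]
    rw [PySem.List.insertBy_of_forall_not_before]
    · simp [hx]
    · intro a ha; simp [hF 0 a ha, hx]
  | succ n ih =>
    simp only [concatD]
    rw [insertBy_append_left _ _ _ _ (by
      intro a ha
      simp only [decide_eq_false_iff_not, not_lt, hF _ a ha]
      push_cast at hxn ⊢; omega)]
    by_cases hc : x.2 = (n : Int) + 1
    · have htail : PySem.List.insertBy (fun a b => decide (b.2 < a.2)) x (concatD F n)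
          = x :: concatD F n := by
        cases hcd : concatD F n with
        | nil => simp [PySem.List.insertBy]
        | cons b bs =>
          rw [insertBy_cons_of_before]
          have hb : b ∈ concatD F n := by rw [hcd]; exact List.mem_cons_self
          have := mem_concatD_key_le F hF n b hb
          simp only [decide_eq_true_eq]; omega
      rw [htail, if_pos hc,
        concatD_congr n (F := fun s => F s ++ if x.2 = s then [x] else []) (G := F)
          (fun s h1 h2 => by
            show F s ++ (if x.2 = s then [x] else []) = F s
            rw [if_neg (by omega : ¬ x.2 = s), List.append_nil])]
      simp
    · rw [ih (by push_cast at hxn ⊢; omega), if_neg hc, List.append_nil]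

-- the stable reverse sort of a list with keys in [0, K] is the descending bucket concatenation
theorem sorted_rev_eq_concatD (qs : List (String × Int)) (K : Nat)
    (hq : ∀ p ∈ qs, 0 ≤ p.2 ∧ p.2 ≤ (K : Int)) :
    PySem.List.sorted qs (fun x => x.2) true
      = concatD (fun s => qs.filter (fun p => p.2 == s)) K := by
  rw [PySem.List.sorted_rev_eq_foldl_insertBy]
  induction qs using List.reverseRecOn with
  | nil => simp [concatD_nil]
  | append_singleton qs x ih =>
    rw [List.foldl_append, List.foldl_cons, List.foldl_nil,
      ih (fun p hp => hq p (List.mem_append_left _ hp))]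
    have hx := hq x (List.mem_append_right _ List.mem_cons_self)
    rw [insertBy_concatD _ _ _ hx.1 hx.2 (fun s a ha => by simpa using (List.mem_filter.mp ha).2)]
    apply concatD_congr
    intro s _ _
    simp only [List.filter_append, List.filter_cons, List.filter_nil]
    by_cases h : x.2 = s <;> simp [h]

theorem rank_hashtags_by_relevance_py_spec : Claim_equal_rank_hashtags_by_relevance_py := by
  intro hashtags content_analysis _ hpre
  unfold Spec_rank_hashtags_by_relevance_py
  unfold Pre_rank_hashtags_by_relevance_py at hpre
  unfold rank_hashtags_by_relevance_py rank_hashtags_by_relevance_py_alt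
  cases hlk : content_analysis.lookup "content_keywords" with
  | none => rw [hlk] at hpre
  | some kws =>
    simp only [PySem.List.foldl_count_if, zero_add,
      PySem.List.foldl_append_singleton_eq_map, List.nil_append]
    have hbounds : ∀ p ∈ hashtags.map (fun h => (h,
        ((kws.countP (fun kw => PySem.Str.isIn kw (PySem.Str.lower (PySem.Str.replace h "#" "")) ||
          PySem.Str.isIn (PySem.Str.lower (PySem.Str.replace h "#" "")) kw)) : Int))),
        0 ≤ p.2 ∧ p.2 ≤ (kws.length : Int) := by
      intro p hp
      simp only [List.mem_map] at hp
      obtain ⟨h, _, rfl⟩ := hp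
      refine ⟨Int.natCast_nonneg _, ?_⟩
      show ((List.countP _ kws : Nat) : Int) ≤ ((kws.length : Nat) : Int)
      exact_mod_cast List.countP_le_length
    rw [sorted_rev_eq_concatD _ kws.length hbounds, map_concatD,
      foldl_pyRange_desc, List.nil_append]
    apply concatD_congr
    intro s _ _
    rw [PySem.Dict.getD_foldl_modify_append]
    simp [List.filter_map, List.map_map, Function.comp_def]
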